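-- pv_equiv track=rewrite | github.com/BigOasis/Python | minji/Week9/PGS_388352_비밀_코드_해독.py | solution
-- ===== SOURCE A (Python) =====
-- from itertools import combinations
--
-- def solution(n, q, ans):
--     count = 0
--
--     # 1~n 중 5개 조합 전부 탐색
--     for code in combinations(range(1, n+1), 5):
--         code_set = set(code)
--         valid = True
--
--         # 모든 시도 검사
--         for query, res in zip(q, ans):
--             if len(code_set & set(query)) != res:
--                 valid = False
--                 break
--
--         if valid:
--             count += 1
--
--     return count
-- ===== SOURCE B (Python) =====
-- def solution(n, q, ans):
--     pairs = list(zip(q, ans))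
--
--     def matches(path):
--         return all(sum(1 for x in path if x in query) == res
--                    for query, res in pairs)
--
--     def dfs(start, path):
--         if len(path) == 5:
--             return 1 if matches(path) else 0
--         total = 0
--         for v in range(start, n + 1):
--             path.append(v)
--             total += dfs(v + 1, path)
--             path.pop()
--         return total
--
--     return dfs(1, [])
-- ===== Notes on version B (the rewrite author's own statement) =====
-- stated objective: alternative
-- what changed: Replaced the flat itertools.combinations loop with set-intersection checks by a recursive DFS/backtracking over the choice tree (start index threaded through recursion) that validates a candidate by counting path elements contained in each query.
import Mathlib
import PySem

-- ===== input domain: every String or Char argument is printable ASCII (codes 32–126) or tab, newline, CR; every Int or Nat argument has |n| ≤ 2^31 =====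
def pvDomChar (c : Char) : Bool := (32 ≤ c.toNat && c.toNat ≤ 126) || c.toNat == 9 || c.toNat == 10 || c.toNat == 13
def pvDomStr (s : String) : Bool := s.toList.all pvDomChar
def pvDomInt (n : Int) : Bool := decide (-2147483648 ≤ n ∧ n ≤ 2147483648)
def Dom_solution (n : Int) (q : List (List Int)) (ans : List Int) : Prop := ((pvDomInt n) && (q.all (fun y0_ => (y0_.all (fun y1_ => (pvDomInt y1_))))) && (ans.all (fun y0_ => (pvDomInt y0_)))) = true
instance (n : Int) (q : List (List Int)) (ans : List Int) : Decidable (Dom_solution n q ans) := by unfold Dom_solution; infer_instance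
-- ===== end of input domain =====

-- B replaces the flat itertools.combinations scan with a recursive DFS over the choice tree
-- (start index threaded, per-query membership counts instead of set intersection); objective: alternative.

-- ===== PORT A =====
-- inner 'for query, res in zip(q, ans)' loop with early break
def checkA (codeSet : PySem.Set Int) : List (List Int × Int) → Bool
  | [] => true
  | (query, res) :: rest =>
    if ((PySem.Set.len (PySem.Set.inter codeSet (PySem.Set.ofList query)) : Int) ≠ res) then
      false
    else
      checkA codeSet rest

def solution (n : Int) (q : List (List Int)) (ans : List Int) : Int :=
  (PySem.List.combinations (PySem.List.pyRange 1 (n + 1) 1) 5).foldl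
    (fun count code =>
      let codeSet := PySem.Set.ofList code
      if checkA codeSet (q.zip ans) then count + 1 else count)
    0

-- ===== PORT B =====
-- all(sum(1 for x in path if x in query) == res for query, res in pairs)
def matchesB (pairs : List (List Int × Int)) (path : List Int) : Bool :=
  pairs.all (fun qr => ((path.countP (fun x => qr.1.contains x) : Int) == qr.2))

-- dfs(start, path); the Nat argument is 5 - len(path), the number of picks still to make
def dfsB (pairs : List (List Int × Int)) (n : Int) : Nat → Int → List Int → Int
  | 0, _, path => if matchesB pairs path then 1 else 0
  | k + 1, start, path =>
    (PySem.List.pyRange start (n + 1) 1).foldl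
      (fun total v => total + dfsB pairs n k (v + 1) (path ++ [v])) 0

def solution_alt (n : Int) (q : List (List Int)) (ans : List Int) : Int :=
  dfsB (q.zip ans) n 5 1 []

-- ===== PRECONDITION & SPEC =====
def Spec_solution (n : Int) (q : List (List Int)) (ans : List Int) (out : Int) : Prop := out = solution_alt n q ans
instance (n : Int) (q : List (List Int)) (ans : List Int) (out : Int) : Decidable (Spec_solution n q ans out) := by unfold Spec_solution; infer_instance

-- ===== CLAIM (what is proved, stated in full; the proofs are below) =====
def Claim_equal_solution : Prop := ∀ (n : Int) (q : List (List Int)) (ans : List Int), Dom_solution n q ans → Spec_solution n q ans (solution n q ans)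

-- ===== LEMMAS AND PROOFS =====

-- A's break-loop check equals B's all-quantified membership count on a duplicate-free code
theorem checkA_eq_matchesB (code : List Int) (hnd : code.Nodup)
    (pairs : List (List Int × Int)) :
    checkA (PySem.Set.ofList code) pairs = matchesB pairs code := by
  induction pairs with
  | nil => simp [checkA, matchesB]
  | cons p rest ih =>
    obtain ⟨query, res⟩ := p
    have hlen : ((PySem.Set.inter (PySem.Set.ofList code) (PySem.Set.ofList query)).len : Int)
        = (code.countP (fun x => query.contains x) : Int) := by
      rw [PySem.Set.ofList_eq_self_of_nodup code hnd]
      simp [PySem.Set.inter, PySem.Set.len, PySem.Set.contains, List.countP_eq_length_filter,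
        PySem.Set.mem_ofList]
    rw [checkA, hlen]
    by_cases h : (code.countP (fun x => query.contains x) : Int) = res
    · rw [if_neg (by simpa using h), ih]
      simp [matchesB] at h ⊢
      simp [h]
    · rw [if_pos (by simpa using h)]
      simp [matchesB] at h ⊢
      simp [h]

-- the DFS counts exactly the valid extensions of `path` by a k-combination of range(start, n+1)
theorem dfsB_eq_countP (pairs : List (List Int × Int)) (n : Int) :
    ∀ (k : Nat) (start : Int) (path : List Int),
      dfsB pairs n k start path
        = ((PySem.List.combinations (PySem.List.pyRange start (n + 1) 1) k).countP
            (fun c => matchesB pairs (path ++ c)) : Int) := by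
  intro k
  induction k with
  | zero =>
    intro start path
    simp [dfsB, PySem.List.combinations_zero, List.countP_singleton]
  | succ k ih =>
    intro start path
    -- inner induction on the length of the range
    have hrange : ∀ (m : Nat) (start : Int), m = (n + 1 - start).toNat → ∀ path,
        dfsB pairs n (k + 1) start path
          = ((PySem.List.combinations (PySem.List.pyRange start (n + 1) 1) (k + 1)).countP
              (fun c => matchesB pairs (path ++ c)) : Int) := by
      intro m
      induction m with
      | zero =>
        intro start hm path
        have hle : n + 1 ≤ start := by omega
        rw [dfsB, PySem.List.pyRange_one_eq_nil hle]
        simp [PySem.List.combinations_nil_succ, List.countP]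
      | succ m ihm =>
        intro start hm path
        have hlt : start < n + 1 := by omega
        rw [dfsB, PySem.List.pyRange_one_cons hlt]
        rw [List.foldl_cons]
        have hfold : ∀ (L : List Int) (a : Int),
            L.foldl (fun total v => total + dfsB pairs n k (v + 1) (path ++ [v])) a
              = a + L.foldl (fun total v => total + dfsB pairs n k (v + 1) (path ++ [v])) 0 := by
          intro L
          induction L with
          | nil => intro a; simp
          | cons x xs ihL => intro a; rw [List.foldl_cons, List.foldl_cons, ihL, ihL (0 + _)]; ring
        rw [hfold]
        have htail : (PySem.List.pyRange (start + 1) (n + 1) 1).foldl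
              (fun total v => total + dfsB pairs n k (v + 1) (path ++ [v])) 0
            = dfsB pairs n (k + 1) (start + 1) path := by
          rw [dfsB]
        rw [htail, ihm (start + 1) (by omega) path]
        rw [PySem.List.combinations_cons_succ]
        rw [List.countP_append, List.countP_map]
        have hmap : (PySem.List.combinations (PySem.List.pyRange (start + 1) (n + 1) 1) k).countP
              ((fun c => matchesB pairs (path ++ c)) ∘ (start :: ·))
            = (PySem.List.combinations (PySem.List.pyRange (start + 1) (n + 1) 1) k).countP
              (fun c => matchesB pairs ((path ++ [start]) ++ c)) := by
          apply List.countP_congr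
          intro c _
          simp
        rw [hmap]
        have := ih (start + 1) (path ++ [start])
        rw [zero_add, this]
        push_cast
        ring
    exact hrange (n + 1 - start).toNat start rfl path

-- A's counting fold over combinations is a countP
theorem solution_eq_countP (n : Int) (q : List (List Int)) (ans : List Int) :
    solution n q ans
      = ((PySem.List.combinations (PySem.List.pyRange 1 (n + 1) 1) 5).countP
          (fun code => checkA (PySem.Set.ofList code) (q.zip ans)) : Int) := by
  unfold solution
  rw [PySem.List.foldl_count_if]
  simp

-- ===== VERDICT (by name: the statement is the Claim_ definition above) =====
theorem solution_spec : Claim_equal_solution := by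
  intro n q ans _
  unfold Spec_solution solution_alt
  rw [solution_eq_countP, dfsB_eq_countP]
  congr 1
  apply List.countP_congr
  intro code hc
  have hsub : code.Sublist (PySem.List.pyRange 1 (n + 1) 1) :=
    PySem.List.sublist_of_mem_combinations hc
  have hnd : code.Nodup := hsub.nodup (PySem.List.nodup_pyRange_one 1 (n + 1))
  simp [checkA_eq_matchesB code hnd]
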